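-- pv_equiv track=rewrite | github.com/dj-lumiere/problem-solving-boj | 백준/Gold/14698. 전생했더니 슬라임 연구자였던 건에 대하여 （Hard）/전생했더니 슬라임 연구자였던 건에 대하여 （Hard）.py | find_minimal_slime_form_energy
-- ===== SOURCE A (Python) =====
-- from heapq import heapify, heappop, heappush
--
-- MOD = 1_000_000_007
--
-- def find_minimal_slime_form_energy(slime_sizes: list[int]) -> int:
--     heapify(slime_sizes)
--     result = 1
--     if len(slime_sizes) == 1:
--         return 1
--     while len(slime_sizes) > 1:
--         target1 = heappop(slime_sizes)
--         target2 = heappop(slime_sizes)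
--         result *= target1 * target2
--         heappush(slime_sizes, target1 * target2)
--     return result % MOD
-- ===== SOURCE B (Python) =====
-- # Same result as A, computed with a sorted list instead of a heap: sort once,
-- # always take the two smallest from the front, binary-search-insert the product back.
-- # Note: A mutates slime_sizes in place (heapify/pops); B does not. Return values agree.
-- MOD = 1_000_000_007
--
-- def _insert_sorted(q: list, x: int) -> list:
--     lo, hi = 0, len(q)
--     while lo < hi:
--         mid = (lo + hi) // 2
--         if q[mid] < x:
--             lo = mid + 1
--         else:
--             hi = mid
--     return q[:lo] + [x] + q[lo:]
--
-- def find_minimal_slime_form_energy(slime_sizes: list[int]) -> int: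
--     if len(slime_sizes) <= 1:
--         return 1
--     q = sorted(slime_sizes)
--     result = 1
--     while len(q) > 1:
--         p = q[0] * q[1]
--         result = result * p % MOD
--         q = _insert_sorted(q[2:], p)
--     return result
-- ===== Notes on version B (the rewrite author's own statement) =====
-- stated objective: alternative
-- what changed: Replaces the heapq binary heap with a sort-once sorted list: the two smallest values are always at the front and each merge product is re-inserted by a hand-written binary search, with the modulus applied at every step instead of once at the end.
import Mathlib
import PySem

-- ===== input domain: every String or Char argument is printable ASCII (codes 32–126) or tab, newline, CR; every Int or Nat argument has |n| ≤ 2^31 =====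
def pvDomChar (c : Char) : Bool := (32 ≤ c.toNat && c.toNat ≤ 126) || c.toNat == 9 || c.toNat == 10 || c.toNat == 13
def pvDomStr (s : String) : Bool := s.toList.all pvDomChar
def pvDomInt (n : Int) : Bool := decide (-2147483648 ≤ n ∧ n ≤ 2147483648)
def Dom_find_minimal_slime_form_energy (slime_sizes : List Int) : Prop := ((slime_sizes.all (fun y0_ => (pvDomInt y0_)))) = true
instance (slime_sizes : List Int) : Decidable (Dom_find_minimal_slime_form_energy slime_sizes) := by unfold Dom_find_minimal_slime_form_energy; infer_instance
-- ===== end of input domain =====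

-- B replaces the heapq binary heap with a sort-once sorted list (front = two minima,
-- product re-inserted by binary search) and reduces mod p each step; return values agree.
-- A mutates slime_sizes in place (heapify/pops), B does not: equivalence is about the return value.

-- ===== PORT A =====
def pvMOD : Int := 1000000007

-- heapq is an opaque C library; it is modeled by its contract: the heap is the bag of its
-- elements (heapify = identity on the bag), heappop returns the minimum value and removes
-- one occurrence of it, heappush appends. Observationally exact here: only the popped
-- minimum VALUES reach the result.
def pyHeapify (l : List Int) : List Int := l

def pyHeappop (l : List Int) : Int × List Int :=
  match PySem.List.min? l (fun x => x) with
  | none => (0, l)   -- unreachable: A never pops an empty heap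
  | some m => (m, (PySem.List.remove? l m).getD l)

def pyHeappush (l : List Int) (x : Int) : List Int := l ++ [x]

-- 'while len(slime_sizes) > 1: …'; fuel bounds the iteration count (length shrinks by 1 each turn)
def pvLoopA : Nat → List Int → Int → Int
  | 0, _, r => PySem.Int.mod r pvMOD
  | fuel+1, l, r =>
    if l.length > 1 then
      let p1 := pyHeappop l
      let p2 := pyHeappop p1.2
      pvLoopA fuel (pyHeappush p2.2 (p1.1 * p2.1)) (r * (p1.1 * p2.1))
    else PySem.Int.mod r pvMOD

def find_minimal_slime_form_energy (slime_sizes : List Int) : Int :=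
  let h := pyHeapify slime_sizes
  if h.length = 1 then 1 else pvLoopA h.length h 1

-- ===== PORT B =====
-- the hand-written bisect_left loop of Source B ('while lo < hi: …')
def pvBisect (q : List Int) (x : Int) (lo hi : Nat) : Nat :=
  if h : lo < hi then
    let mid := (lo + hi) / 2
    if q.getD mid 0 < x then pvBisect q x (mid + 1) hi else pvBisect q x lo mid
  else lo
termination_by hi - lo
decreasing_by all_goals omega

-- q[:lo] + [x] + q[lo:]  (lo is a Nat in [0, len q], so take/drop are exact)
def pvInsertSorted (q : List Int) (x : Int) : List Int :=
  let lo := pvBisect q x 0 q.length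
  q.take lo ++ x :: q.drop lo

def pvLoopB : Nat → List Int → Int → Int
  | 0, _, r => r
  | fuel+1, q, r =>
    if q.length > 1 then
      let p := q.getD 0 0 * q.getD 1 0   -- q[0] * q[1]: indices in range (length > 1)
      pvLoopB fuel (pvInsertSorted (q.drop 2) p) (PySem.Int.mod (r * p) pvMOD)
    else r

def find_minimal_slime_form_energy_alt (slime_sizes : List Int) : Int :=
  if slime_sizes.length ≤ 1 then 1
  else pvLoopB slime_sizes.length (PySem.List.sorted slime_sizes (fun x => x)) 1

-- ===== PRECONDITION & SPEC =====
def Spec_find_minimal_slime_form_energy (slime_sizes : List Int) (out : Int) : Prop := out = find_minimal_slime_form_energy_alt slime_sizes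
instance (slime_sizes : List Int) (out : Int) : Decidable (Spec_find_minimal_slime_form_energy slime_sizes out) := by unfold Spec_find_minimal_slime_form_energy; infer_instance

-- ===== CLAIM (what is proved, stated in full; the proofs are below) =====
def Claim_equal_find_minimal_slime_form_energy : Prop := ∀ (slime_sizes : List Int), Dom_find_minimal_slime_form_energy slime_sizes → Spec_find_minimal_slime_form_energy slime_sizes (find_minimal_slime_form_energy slime_sizes)

-- ===== LEMMAS AND PROOFS =====

-- monotone access into a (≤)-sorted list
lemma pv_sorted_getD_mono {q : List Int} (hq : q.Pairwise (· ≤ ·)) {i j : Nat}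
    (hij : i ≤ j) (hj : j < q.length) : q.getD i 0 ≤ q.getD j 0 := by
  rw [List.getD_eq_getElem q 0 (lt_of_le_of_lt hij hj), List.getD_eq_getElem q 0 hj]
  rcases Nat.eq_or_lt_of_le hij with h | h
  · subst h; exact le_refl _
  · exact (List.pairwise_iff_getElem.mp hq) i j _ hj h

-- binary-search invariant: the returned insertion point separates (< x) from (≥ x)
lemma pvBisect_spec (q : List Int) (x : Int) (hq : q.Pairwise (· ≤ ·)) :
    ∀ n lo hi, hi - lo = n → lo ≤ hi → hi ≤ q.length →
    (∀ i, i < lo → q.getD i 0 < x) → (∀ i, hi ≤ i → i < q.length → x ≤ q.getD i 0) →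
    pvBisect q x lo hi ≤ q.length ∧ (∀ i, i < pvBisect q x lo hi → q.getD i 0 < x) ∧
      (∀ i, pvBisect q x lo hi ≤ i → i < q.length → x ≤ q.getD i 0) := by
  intro n
  induction n using Nat.strong_induction_on with
  | _ n ih =>
    intro lo hi hn hlohi hhi hlow hhigh
    rw [pvBisect]
    by_cases h : lo < hi
    · simp only [h, dif_pos]
      by_cases hc : q.getD ((lo + hi) / 2) 0 < x
      · simp only [hc, if_pos]
        refine ih (hi - ((lo + hi) / 2 + 1)) (by omega) _ _ rfl (by omega) hhi ?_ hhigh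
        intro i hi2
        exact lt_of_le_of_lt (pv_sorted_getD_mono hq (by omega) (by omega)) hc
      · simp only [hc, if_neg, not_false_iff]
        refine ih ((lo + hi) / 2 - lo) (by omega) _ _ rfl (by omega) (by omega) hlow ?_
        intro i hi1 hi2
        exact le_trans (not_lt.mp hc) (pv_sorted_getD_mono hq hi1 hi2)
    · simp only [h, dif_neg, not_false_iff]
      exact ⟨by omega, hlow, fun i hi1 hi2 => hhigh i (by omega) hi2⟩

lemma pvInsertSorted_perm (q : List Int) (x : Int) : (pvInsertSorted q x).Perm (x :: q) := by
  unfold pvInsertSorted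
  refine (List.perm_middle).trans ?_
  rw [List.take_append_drop]

lemma pvInsertSorted_pairwise {q : List Int} (hq : q.Pairwise (· ≤ ·)) (x : Int) :
    (pvInsertSorted q x).Pairwise (· ≤ ·) := by
  obtain ⟨hle, hlt, hge⟩ := pvBisect_spec q x hq q.length 0 q.length rfl (Nat.zero_le _)
    le_rfl (by omega) (by omega)
  unfold pvInsertSorted
  set lo := pvBisect q x 0 q.length with hlo
  have hmem_take : ∀ a ∈ q.take lo, a < x := by
    intro a ha
    obtain ⟨i, hi, rfl⟩ := List.getElem_of_mem ha
    have hi' : i < lo := lt_of_lt_of_le hi (by simp only [List.length_take]; omega)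
    have hiq : i < q.length := lt_of_lt_of_le hi' hle
    rw [List.getElem_take]
    have := hlt i hi'
    rwa [List.getD_eq_getElem q 0 hiq] at this
  have hmem_drop : ∀ a ∈ q.drop lo, x ≤ a := by
    intro a ha
    obtain ⟨i, hi, rfl⟩ := List.getElem_of_mem ha
    rw [List.getElem_drop]
    have hiq : lo + i < q.length := by simp [List.length_drop] at hi; omega
    have := hge (lo + i) (Nat.le_add_right _ _) hiq
    rwa [List.getD_eq_getElem q 0 hiq] at this
  rw [List.pairwise_append]
  refine ⟨hq.sublist (List.take_sublist _ _), ?_, ?_⟩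
  · rw [List.pairwise_cons]
    exact ⟨hmem_drop, hq.sublist (List.drop_sublist _ _)⟩
  · intro a ha b hb
    rcases List.mem_cons.mp hb with rfl | hb
    · exact le_of_lt (hmem_take a ha)
    · -- a in take, b in drop: a < x ≤ b? no: need a ≤ b directly
      exact le_trans (le_of_lt (hmem_take a ha)) (hmem_drop b hb)

-- popping from a bag that is a permutation of a sorted list a :: t yields a and a permutation of t
lemma pyHeappop_of_perm {l : List Int} {a : Int} {t : List Int}
    (hp : l.Perm (a :: t)) (hs : (a :: t).Pairwise (· ≤ ·)) :
    (pyHeappop l).1 = a ∧ (pyHeappop l).2.Perm t := by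
  have hal : a ∈ l := hp.mem_iff.mpr (List.mem_cons_self)
  have hne : l ≠ [] := by intro h; subst h; simp at hal
  unfold pyHeappop
  cases hmin : PySem.List.min? l (fun x => x) with
  | none => exact absurd ((PySem.List.min?_eq_none_iff l _).mp hmin) hne
  | some m =>
    dsimp only
    have hmem : m ∈ l := PySem.List.min?_mem hmin
    have hmin_le : ∀ y ∈ l, m ≤ y := fun y hy => PySem.List.min?_isMin hmin y hy
    have hma : m = a := by
      have h1 : m ≤ a := hmin_le a hal
      have h2 : a ≤ m := by
        have hmq : m ∈ a :: t := hp.mem_iff.mp hmem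
        rcases List.mem_cons.mp hmq with rfl | hmt
        · exact le_refl _
        · exact (List.pairwise_cons.mp hs).1 m hmt
      omega
    subst hma
    rw [PySem.List.remove?_eq_some_erase l m hmem]
    refine ⟨rfl, ?_⟩
    simp only [Option.getD_some]
    have := hp.erase m
    rwa [List.erase_cons_head] at this

lemma pvLoopA_short {fa : Nat} {l : List Int} {r : Int} (h : ¬ l.length > 1) :
    pvLoopA fa l r = PySem.Int.mod r pvMOD := by
  cases fa <;> simp [pvLoopA, h]

lemma pvLoopB_short {fb : Nat} {q : List Int} {r : Int} (h : ¬ q.length > 1) :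
    pvLoopB fb q r = r := by
  cases fb <;> simp [pvLoopB, h]

lemma pv_mod_mul (r p : Int) :
    PySem.Int.mod (r * p) pvMOD = PySem.Int.mod (PySem.Int.mod r pvMOD * p) pvMOD := by
  rw [PySem.Int.mod_eq_emod_of_pos (by norm_num [pvMOD]),
      PySem.Int.mod_eq_emod_of_pos (by norm_num [pvMOD]),
      PySem.Int.mod_eq_emod_of_pos (by norm_num [pvMOD])]
  conv_rhs => rw [Int.mul_emod, Int.emod_emod_of_dvd _ dvd_rfl, ← Int.mul_emod]

-- main loop coupling: same bag, B's list sorted, B's accumulator is A's reduced mod p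
lemma pvLoop_eq : ∀ (fa : Nat) (fb : Nat) (l q : List Int) (r : Int),
    l.Perm q → q.Pairwise (· ≤ ·) → l.length ≤ fa → q.length ≤ fb →
    pvLoopA fa l r = pvLoopB fb q (PySem.Int.mod r pvMOD) := by
  intro fa
  induction fa with
  | zero =>
    intro fb l q r hp hs hla hlb
    have hl : ¬ l.length > 1 := by omega
    have hq : ¬ q.length > 1 := by rw [← hp.length_eq]; omega
    rw [pvLoopA_short hl, pvLoopB_short hq]
  | succ fa ih =>
    intro fb l q r hp hs hla hlb
    by_cases hl : l.length > 1
    · have hql : q.length = l.length := hp.length_eq.symm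
      rcases q with _ | ⟨a, _ | ⟨b, t⟩⟩
      · simp at hql; omega
      · simp at hql; omega
      · rcases fb with _ | fb
        · simp at hlb
        · have hs' : (b :: t).Pairwise (· ≤ ·) := (List.pairwise_cons.mp hs).2
          obtain ⟨h11, h12⟩ := pyHeappop_of_perm hp hs
          obtain ⟨h21, h22⟩ := pyHeappop_of_perm h12 hs'
          have hlen2 : (pyHeappop (pyHeappop l).2).2.length = t.length := h22.length_eq
          -- one step of A
          rw [show pvLoopA (fa + 1) l r
                = pvLoopA fa (pyHeappush (pyHeappop (pyHeappop l).2).2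
                    ((pyHeappop l).1 * (pyHeappop (pyHeappop l).2).1))
                    (r * ((pyHeappop l).1 * (pyHeappop (pyHeappop l).2).1)) from by
                simp [pvLoopA, hl]]
          rw [h11, h21]
          -- one step of B
          rw [show pvLoopB (fb + 1) (a :: b :: t) (PySem.Int.mod r pvMOD)
                = pvLoopB fb (pvInsertSorted t (a * b))
                    (PySem.Int.mod (PySem.Int.mod r pvMOD * (a * b)) pvMOD) from by
                simp [pvLoopB, pvInsertSorted]]
          rw [← pv_mod_mul]
          refine ih fb _ _ _ ?_ (pvInsertSorted_pairwise (List.pairwise_cons.mp hs').2 _) ?_ ?_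
          · have hA1 : (pyHeappush (pyHeappop (pyHeappop l).2).2 (a * b)).Perm (t ++ [a * b]) :=
              h22.append_right [a * b]
            have hA2 : (t ++ [a * b]).Perm (a * b :: t) := List.perm_append_singleton _ _
            exact (hA1.trans hA2).trans (pvInsertSorted_perm t (a * b)).symm
          · have h1 : (pyHeappush (pyHeappop (pyHeappop l).2).2 (a * b)).length
                = t.length + 1 := by simp [pyHeappush, hlen2]
            have h2 : l.length = t.length + 2 := by rw [← hql]; simp
            omega
          · have h3 := (pvInsertSorted_perm t (a * b)).length_eq
            simp only [List.length_cons] at h3 hlb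
            omega
    · have hq : ¬ q.length > 1 := by rw [← hp.length_eq]; omega
      rw [pvLoopA_short hl, pvLoopB_short hq]

lemma pv_mod_one : PySem.Int.mod 1 pvMOD = 1 := by decide

-- ===== VERDICT (by name: the statement is the Claim_ definition above) =====
theorem find_minimal_slime_form_energy_spec : Claim_equal_find_minimal_slime_form_energy := by
  unfold Claim_equal_find_minimal_slime_form_energy
  intro s _
  unfold Spec_find_minimal_slime_form_energy
  unfold find_minimal_slime_form_energy find_minimal_slime_form_energy_alt pyHeapify
  by_cases h1 : s.length = 1
  · simp [h1]
  · by_cases h0 : s.length ≤ 1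
    · have : s.length = 0 := by omega
      rw [if_neg h1, if_pos h0, pvLoopA_short (by omega), pv_mod_one]
    · rw [if_neg h1, if_neg h0]
      have hperm : s.Perm (PySem.List.sorted s (fun x => x)) :=
        (PySem.List.sorted_perm s (fun x => x) false).symm
      have hlen := hperm.length_eq
      rw [pvLoop_eq s.length s.length s (PySem.List.sorted s (fun x => x)) 1 hperm
            (PySem.List.sorted_pairwise s (fun x => x)) le_rfl (by omega), pv_mod_one]
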